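-- pv_equiv track=rewrite | github.com/Creeper0809/PCFGCracking | pcfg_lib/training/detectors/leet_detection.py | all_merge_combinations
-- ===== SOURCE A (Python) =====
-- from typing import List, Tuple, Optional
--
-- Seg = Tuple[str, Optional[str]]
--
-- def _safe_sort_key(sequence: List[Seg]) -> Tuple[int, str]:
--     """
--     정렬 키 생성: 주로 세그먼트 개수, 부차적으로 텍스트를 이어 붙인 문자열
--     """
--     length = len(sequence)
--     joined = ''.join(text for text, _ in sequence)
--     return length, joined
--
-- def all_merge_combinations(segments: List[Seg]) -> List[List[Seg]]:
--     """
--     인접 세그먼트를 병합하거나 그대로 두는 모든 조합을 생성합니다.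
--
--     n개의 세그먼트에 대해 2^(n-1)개의 병합 패턴을 고려합니다.
--     병합 후, 결과 세그먼트가 원래 레이블이 붙은 리트 단어와 정확히 일치하면 레이블을 유지합니다.
--     """
--     if not segments:
--         return []
--
--     n = len(segments)
--     results: List[List[Seg]] = []
--
--     for mask in range(1 << (n - 1)):
--         combo: List[Seg] = []
--         current_text, current_label = segments[0]
--
--         for i in range(1, n):
--             next_text, next_label = segments[i]
--             merge = not (mask & (1 << (i - 1)))
--             if merge:
--                 # 현재와 다음 세그먼트 병합, 레이블 제거
--                 current_text += next_text
--                 current_label = None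
--             else:
--                 # 현재 세그먼트 확정
--                 combo.append((current_text, current_label))
--                 current_text, current_label = next_text, next_label
--
--         combo.append((current_text, current_label))
--         results.append(combo)
--
--     # 일관된 순서를 위해 정렬
--     results.sort(key=_safe_sort_key)
--     return results
-- ===== SOURCE B (Python) =====
-- def all_merge_combinations(segments):
--     if not segments:
--         return []
--     # subset-doubling: extend every existing partition of the processed prefix by
--     # either merging the new segment into its last group or starting a new group
--     parts = [[segments[0]]]
--     for text, label in segments[1:]:
--         parts = [p[:-1] + [(p[-1][0] + text, None)] for p in parts] \
--               + [p + [(text, label)] for p in parts]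
--     parts.sort(key=lambda seq: (len(seq), ''.join(t for t, _ in seq)))
--     return parts
-- ===== Notes on version B (the rewrite author's own statement) =====
-- stated objective: alternative
-- what changed: Replaces the enumeration of 2^(n-1) bitmasks with an inner per-bit loop by iterative subset-doubling over the segments: each new segment either merges into the last group of every existing partition or starts a new group, producing the same partition list in the same order before the identical stable sort.
import Mathlib
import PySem

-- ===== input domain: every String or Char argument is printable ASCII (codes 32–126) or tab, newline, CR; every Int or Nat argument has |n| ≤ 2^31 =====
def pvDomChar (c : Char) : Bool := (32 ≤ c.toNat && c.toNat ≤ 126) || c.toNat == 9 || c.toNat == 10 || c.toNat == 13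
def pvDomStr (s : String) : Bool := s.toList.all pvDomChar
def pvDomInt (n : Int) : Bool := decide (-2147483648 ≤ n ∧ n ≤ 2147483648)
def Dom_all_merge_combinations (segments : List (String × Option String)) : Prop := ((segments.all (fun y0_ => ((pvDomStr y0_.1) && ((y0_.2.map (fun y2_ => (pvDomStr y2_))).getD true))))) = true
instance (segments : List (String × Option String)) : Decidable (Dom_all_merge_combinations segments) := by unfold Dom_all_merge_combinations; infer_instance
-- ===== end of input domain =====

-- B replaces the 2^(n-1) bitmask double loop by iterative subset-doubling over the
-- segments (each new segment either merges into the last group of every existing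
-- partition or starts a new group); same final stable sort, same return value.

-- ===== PORT A =====
-- port of the module helper _safe_sort_key: the Python key tuple (len, joined) is
-- passed to PySem.List.sorted2 as its two components
def safe_sort_key_len (sequence : List (String × Option String)) : Int :=
  sequence.length
def safe_sort_key_joined (sequence : List (String × Option String)) : String :=
  PySem.Str.join "" (sequence.map Prod.fst)

-- inner loop body: 'for i in range(1, n)' walks segments[1:] with bit index i-1,
-- ported as a fold over rest.zipIdx (element paired with its 0-based index)
def amcStep (mask : Nat) (st : List (String × Option String) × String × Option String)
    (p : (String × Option String) × Nat) :
    List (String × Option String) × String × Option String :=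
  if mask &&& (1 <<< p.2) == 0 then
    (st.1, st.2.1 ++ p.1.1, none)
  else
    (st.1 ++ [(st.2.1, st.2.2)], p.1.1, p.1.2)

-- one iteration of the outer loop: the combo built for a single mask
def amcPart (t0 : String) (l0 : Option String) (rest : List (String × Option String))
    (mask : Nat) : List (String × Option String) :=
  let st := rest.zipIdx.foldl (amcStep mask) ([], t0, l0)
  st.1 ++ [(st.2.1, st.2.2)]

-- 'for mask in range(1 << (n-1))': the masks are the naturals 0..2^(n-1)-1, ported as List.range
def all_merge_combinations (segments : List (String × Option String)) :
    List (List (String × Option String)) :=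
  match segments with
  | [] => []
  | (t0, l0) :: rest =>
    let results := (List.range (2 ^ rest.length)).foldl
      (fun results mask => results ++ [amcPart t0 l0 rest mask]) []
    PySem.List.sorted2 results safe_sort_key_len safe_sort_key_joined

-- ===== PORT B =====
-- p[:-1] + [(p[-1][0] + text, None)] : merge the new text into p's last group
def amcMergeInto (p : List (String × Option String)) (text : String) :
    List (String × Option String) :=
  p.dropLast ++ [(((PySem.List.pyGet? p (-1)).getD ("", none)).1 ++ text, none)]

-- p + [(text, label)] : start a new group
def amcAppendTo (p : List (String × Option String)) (seg : String × Option String) :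
    List (String × Option String) :=
  p ++ [seg]

-- one loop iteration of Source B: both comprehensions, merged variants first
def amcGrow (parts : List (List (String × Option String))) (seg : String × Option String) :
    List (List (String × Option String)) :=
  parts.map (amcMergeInto · seg.1) ++ parts.map (amcAppendTo · seg)

def all_merge_combinations_alt (segments : List (String × Option String)) :
    List (List (String × Option String)) :=
  match segments with
  | [] => []
  | s0 :: rest =>
    let parts := rest.foldl amcGrow [[s0]]
    PySem.List.sorted2 parts (fun seq => (seq.length : Int))
      (fun seq => PySem.Str.join "" (seq.map Prod.fst))

-- ===== PRECONDITION & SPEC =====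
def Spec_all_merge_combinations (segments : List (String × Option String)) (out : List (List (String × Option String))) : Prop := out = all_merge_combinations_alt segments
instance (segments : List (String × Option String)) (out : List (List (String × Option String))) : Decidable (Spec_all_merge_combinations segments out) := by unfold Spec_all_merge_combinations; infer_instance

-- ===== CLAIM (what is proved, stated in full; the proofs are below) =====
def Claim_equal_all_merge_combinations : Prop := ∀ (segments : List (String × Option String)), Dom_all_merge_combinations segments → Spec_all_merge_combinations segments (all_merge_combinations segments)

-- ===== LEMMAS AND PROOFS =====

-- appending a segment while its mask bit is 0 (mask < 2^|r|) merges it into the last group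
lemma amcPart_append_merge (t0 : String) (l0 : Option String)
    (r : List (String × Option String)) (x : String × Option String)
    (mask : Nat) (h : mask < 2 ^ r.length) :
    amcPart t0 l0 (r ++ [x]) mask = amcMergeInto (amcPart t0 l0 r mask) x.1 := by
  unfold amcPart amcMergeInto
  rw [List.zipIdx_append, List.foldl_append]
  have hb : mask &&& (1 <<< r.length) == 0 := by
    rw [Nat.one_shiftLeft, Nat.and_two_pow, Nat.testBit_lt_two_pow h]
    simp
  simp [List.zipIdx, amcStep, hb, PySem.List.pyGet?_neg_one_append_singleton]

-- appending a segment while its mask bit is 1 (masks 2^|r| + m, m < 2^|r|) closes the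
-- current group and starts a new one; the lower bits are unchanged
lemma amcPart_append_new (t0 : String) (l0 : Option String)
    (r : List (String × Option String)) (x : String × Option String)
    (mask : Nat) (h : mask < 2 ^ r.length) :
    amcPart t0 l0 (r ++ [x]) (2 ^ r.length + mask) = amcAppendTo (amcPart t0 l0 r mask) x := by
  unfold amcPart amcAppendTo
  rw [List.zipIdx_append, List.foldl_append]
  have hlow : r.zipIdx.foldl (amcStep (2 ^ r.length + mask)) ([], t0, l0)
      = r.zipIdx.foldl (amcStep mask) ([], t0, l0) := by
    apply PySem.List.foldl_congr_mem
    intro acc p hp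
    have hlt : p.2 < r.length := by
      simpa using List.snd_lt_of_mem_zipIdx hp
    unfold amcStep
    rw [Nat.one_shiftLeft, Nat.and_two_pow, Nat.and_two_pow,
      Nat.testBit_two_pow_add_gt hlt]
  have hb : ((2 ^ r.length + mask) &&& (1 <<< r.length) == 0) = false := by
    rw [Nat.one_shiftLeft, Nat.and_two_pow, Nat.testBit_two_pow_add_eq,
      Nat.testBit_lt_two_pow h]
    simp
  rw [hlow]
  simp [List.zipIdx, amcStep, hb]

-- the pre-sort lists of A and B coincide, element for element and in order
lemma amc_lists_eq (t0 : String) (l0 : Option String)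
    (rest : List (String × Option String)) :
    (List.range (2 ^ rest.length)).foldl
        (fun results mask => results ++ [amcPart t0 l0 rest mask]) []
      = rest.foldl amcGrow [[(t0, l0)]] := by
  rw [PySem.List.foldl_append_singleton_eq_map]
  induction rest using List.reverseRecOn with
  | nil => rfl
  | append_singleton r x ih =>
    rw [List.foldl_append, List.foldl_cons, List.foldl_nil, ← ih]
    simp only [List.nil_append]
    have hlen : (r ++ [x]).length = r.length + 1 := by simp
    rw [hlen, pow_succ, mul_two, List.range_add, List.map_append, List.map_map]
    unfold amcGrow
    rw [List.map_map, List.map_map]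
    congr 1
    · apply List.map_congr_left
      intro m hm
      exact amcPart_append_merge t0 l0 r x m (List.mem_range.mp hm)
    · apply List.map_congr_left
      intro m hm
      exact amcPart_append_new t0 l0 r x m (List.mem_range.mp hm)

-- ===== VERDICT (by name: the statement is the Claim_ definition above) =====
theorem all_merge_combinations_spec : Claim_equal_all_merge_combinations := by
  intro segments _
  unfold Spec_all_merge_combinations
  match segments with
  | [] => rfl
  | (t0, l0) :: rest =>
    show PySem.List.sorted2 _ safe_sort_key_len safe_sort_key_joined = _
    rw [amc_lists_eq]
    rfl
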